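-- pv_equiv track=rewrite | github.com/Hironobu-Kawaguchi/atcoder | atcoder/past201912_f.py | up2low
-- ===== SOURCE A (Python) =====
-- def up2low(s):
--     res = ''
--     for i in range(len(s)):
--         if i == 0 or i == len(s)-1:
--             res += s[i].lower()
--         else:
--             res += s[i]
--     return res
-- ===== SOURCE B (Python) =====
-- def up2low(s):
--     if not s:
--         return s
--     if len(s) == 1:
--         return s.lower()
--     return s[0].lower() + s[1:-1] + s[-1].lower()
-- ===== Notes on version B (the rewrite author's own statement) =====
-- stated objective: simpler
-- what changed: Replaced the per-character index loop with direct end access and slicing: guard for empty/one-char strings, then lowercase only s[0] and s[-1] and keep the middle s[1:-1] as one slice.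
import Mathlib
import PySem

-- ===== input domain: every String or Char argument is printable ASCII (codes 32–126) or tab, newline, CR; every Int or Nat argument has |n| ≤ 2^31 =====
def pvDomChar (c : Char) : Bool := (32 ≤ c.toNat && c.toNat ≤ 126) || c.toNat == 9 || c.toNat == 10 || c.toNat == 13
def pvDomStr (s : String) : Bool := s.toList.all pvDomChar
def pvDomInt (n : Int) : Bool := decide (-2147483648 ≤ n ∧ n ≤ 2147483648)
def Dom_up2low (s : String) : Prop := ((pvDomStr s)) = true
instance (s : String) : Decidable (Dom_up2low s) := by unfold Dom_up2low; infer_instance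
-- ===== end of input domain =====

-- B lowercases only the two end characters and keeps the middle as one slice; simpler, no per-character loop/branch.

-- ===== PORT A =====
-- for i in range(len(s)): res += s[i].lower() if i == 0 or i == len(s)-1 else s[i]
def up2low (s : String) : String :=
  let cs := s.toList
  let res := (PySem.List.pyRange 0 (cs.length : Int) 1).foldl
    (fun res i =>
      if i == 0 || i == (cs.length : Int) - 1 then
        res ++ [PySem.Chars.lowerChar (PySem.List.pyGetD cs i ' ')]   -- s[i].lower(); i always in range
      else
        res ++ [PySem.List.pyGetD cs i ' ']) []
  String.ofList res

-- ===== PORT B =====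
def up2low_alt (s : String) : String :=
  if PySem.Str.len s = 0 then s                                       -- if not s: return s
  else if PySem.Str.len s = 1 then PySem.Str.lower s                  -- if len(s) == 1: return s.lower()
  else
    let cs := s.toList
    String.ofList ([PySem.Chars.lowerChar (cs.headD ' ')]             -- s[0].lower()
      ++ PySem.List.slice cs (some 1) (some (-1))                     -- s[1:-1]
      ++ [PySem.Chars.lowerChar (cs.getLastD ' ')])                   -- s[-1].lower()

-- ===== PRECONDITION & SPEC =====
def Spec_up2low (s : String) (out : String) : Prop := out = up2low_alt s
instance (s : String) (out : String) : Decidable (Spec_up2low s out) := by unfold Spec_up2low; infer_instance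

-- ===== CLAIM (what is proved, stated in full; the proofs are below) =====
def Claim_equal_up2low : Prop := ∀ (s : String), Dom_up2low s → Spec_up2low s (up2low s)

-- ===== LEMMAS AND PROOFS =====

-- the per-index value A's loop appends at index k
def up2lowAt (cs : List Char) (k : Nat) : Char :=
  if (k : Int) = 0 ∨ (k : Int) = (cs.length : Int) - 1
  then PySem.Chars.lowerChar (cs.getD k ' ') else cs.getD k ' '

theorem up2low_foldl_eq_map (cs : List Char) :
    (PySem.List.pyRange 0 (cs.length : Int) 1).foldl
      (fun res i =>
        if i == 0 || i == (cs.length : Int) - 1 then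
          res ++ [PySem.Chars.lowerChar (PySem.List.pyGetD cs i ' ')]
        else
          res ++ [PySem.List.pyGetD cs i ' ']) []
    = (List.range cs.length).map (up2lowAt cs) := by
  have hbody : (fun (res : List Char) (i : Int) =>
      if i == 0 || i == (cs.length : Int) - 1 then
        res ++ [PySem.Chars.lowerChar (PySem.List.pyGetD cs i ' ')]
      else
        res ++ [PySem.List.pyGetD cs i ' '])
    = fun res i => res ++ [if i = 0 ∨ i = (cs.length : Int) - 1
        then PySem.Chars.lowerChar (PySem.List.pyGetD cs i ' ')
        else PySem.List.pyGetD cs i ' '] := by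
    funext res i
    by_cases hc : i = 0 ∨ i = (cs.length : Int) - 1 <;> simp [hc]
  rw [hbody, PySem.List.foldl_append_singleton_eq_map, PySem.List.pyRange_one]
  simp only [List.nil_append, List.map_map]
  apply List.map_congr_left
  intro k hk
  simp only [Function.comp_apply, up2lowAt, zero_add, PySem.List.pyGetD_natCast]

theorem up2low_map_eq_alt_list (cs : List Char) :
    (List.range cs.length).map (up2lowAt cs)
      =
    (match cs with
     | [] => []
     | [c] => [PySem.Chars.lowerChar c]
     | _ => [PySem.Chars.lowerChar (cs.headD ' ')]
            ++ (cs.tail.dropLast)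
            ++ [PySem.Chars.lowerChar (cs.getLastD ' ')]) := by
  match cs with
  | [] => simp
  | [c] => simp [up2lowAt]
  | a :: b :: rest =>
    apply List.ext_getElem
    · simp [List.length_dropLast]
    · intro j h1 h2
      have hj : j ≤ rest.length + 1 := by simpa using h1
      simp only [List.getElem_map, List.getElem_range]
      have hlen : (a :: b :: rest).length = rest.length + 2 := by simp
      by_cases hj0 : j = 0
      · subst hj0; simp [up2lowAt]
      · by_cases hjl : j = rest.length + 1
        · subst hjl
          simp only [up2lowAt, hlen]
          rw [if_pos (by push_cast; omega)]
          simp [List.getLast?_eq_getElem?]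
        · simp only [up2lowAt, hlen]
          rw [if_neg (by push_cast; omega)]
          rw [List.getElem_append_left (by simp [List.length_dropLast]; omega),
              List.getElem_append_right (by simp; omega)]
          simp only [List.getElem_dropLast]
          have h1' : j - 1 < (b :: rest).length := by simp; omega
          simp only [List.length_cons] at h1'
          obtain ⟨k, rfl⟩ := Nat.exists_eq_succ_of_ne_zero hj0
          simp only [List.getD_eq_getElem?_getD]
          simp only [List.getElem?_cons_succ]
          match k with
          | 0 => simp
          | Nat.succ m =>
            simp only [List.getElem?_cons_succ]
            rw [List.getElem?_eq_getElem (by simp at h1' ⊢; omega)]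
            simp

theorem up2low_slice_eq (cs : List Char) (h2 : 2 ≤ cs.length) :
    PySem.List.slice cs (some 1) (some (-1)) = cs.tail.dropLast := by
  simp only [PySem.List.slice, PySem.List.clampIdx_neg_one]
  have hmin : PySem.List.clampIdx cs.length 1 = 1 := by
    simp [PySem.List.clampIdx]
    omega
  rw [hmin, List.dropLast_eq_take]
  simp [List.length_tail, List.drop_one]

-- ===== VERDICT (by name: the statement is the Claim_ definition above) =====
theorem up2low_spec : Claim_equal_up2low := by
  intro s _
  unfold Spec_up2low up2low up2low_alt
  simp only [up2low_foldl_eq_map, up2low_map_eq_alt_list]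
  match hcs : s.toList with
  | [] =>
    have hs : s = "" := by
      have := congrArg String.ofList hcs
      simpa using this
    simp [PySem.Str.len, hs]
  | [c] =>
    have hlen : PySem.Str.len s = 1 := by simp [PySem.Str.len, hcs]
    simp only [hlen]
    have hlow : PySem.Str.lower s = String.ofList (PySem.Chars.lower s.toList) := by
      rw [← PySem.Str.toList_lower]
      exact String.ofList_toList.symm
    rw [hlow, hcs]
    simp [PySem.Chars.lower]
  | a :: b :: rest =>
    have hlen0 : ¬ PySem.Str.len s = 0 := by simp [PySem.Str.len, hcs]; omega
    have hlen1 : ¬ PySem.Str.len s = 1 := by simp [PySem.Str.len, hcs]; omega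
    simp only [hlen0, hlen1, if_false]
    rw [up2low_slice_eq (a :: b :: rest) (by simp)]
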